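-- pv_equiv track=rewrite | github.com/robinthibaut/BEL | experiment/visualization.py | my_alphabet
-- ===== SOURCE A (Python) =====
-- import itertools
-- import string
--
-- def my_alphabet(az):
--     """
--     Method used to make custom figure annotations.
--     :param az:
--     :return:
--     """
--     alphabet = string.ascii_uppercase
--     extended_alphabet = [
--         "".join(i) for i in list(itertools.permutations(alphabet, 2))
--     ]
--
--     if az <= 25:
--         sub = alphabet[az]
--     else:
--         j = az - 26
--         sub = extended_alphabet[j]
--
--     return sub
-- ===== SOURCE B (Python) =====
-- import string
--
-- def my_alphabet(az):
--     # Closed-form: compute the two-letter permutation directly instead of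
--     # materialising all 650 pairs (simpler/faster constant work).
--     alphabet = string.ascii_uppercase
--     if az <= 25:
--         return alphabet[az]
--     j = az - 26
--     first, rem = divmod(j, 25)
--     rest = alphabet[:first] + alphabet[first + 1:]
--     return alphabet[first] + rest[rem]
-- ===== Notes on version B (the rewrite author's own statement) =====
-- stated objective: faster
-- what changed: Replaces the enumeration of all 650 two-letter permutations (built and indexed on every call) with a divmod closed form that computes the pair's two letters directly.
import Mathlib
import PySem

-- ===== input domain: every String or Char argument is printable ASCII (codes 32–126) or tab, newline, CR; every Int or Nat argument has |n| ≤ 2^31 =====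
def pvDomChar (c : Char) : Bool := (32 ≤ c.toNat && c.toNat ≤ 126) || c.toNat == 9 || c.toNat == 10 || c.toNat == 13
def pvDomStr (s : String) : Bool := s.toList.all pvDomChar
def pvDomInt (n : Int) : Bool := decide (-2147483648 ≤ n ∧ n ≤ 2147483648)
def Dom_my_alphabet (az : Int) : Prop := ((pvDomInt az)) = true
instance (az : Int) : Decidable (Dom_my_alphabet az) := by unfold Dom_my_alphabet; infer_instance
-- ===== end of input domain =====

-- B replaces A's enumeration of all 650 two-letter permutations with a divmod closed form (faster constant work).


-- ===== PORT A =====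
def my_alphabet (az : Int) : String :=
  let alphabet : List Char := "ABCDEFGHIJKLMNOPQRSTUVWXYZ".toList
  let extended_alphabet : List String :=
    (PySem.List.permutations alphabet 2).map (fun i => String.ofList i)
  if az ≤ 25 then
    match PySem.List.pyGet? alphabet az with
    | some c => String.ofList [c]
    | none => ""        -- unreachable inside Pre_ (IndexError in Python)
  else
    (PySem.List.pyGet? extended_alphabet (az - 26)).getD ""   -- getD unreachable inside Pre_

-- ===== PORT B =====
def my_alphabet_alt (az : Int) : String :=
  let alphabet : List Char := "ABCDEFGHIJKLMNOPQRSTUVWXYZ".toList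
  if az ≤ 25 then
    match PySem.List.pyGet? alphabet az with
    | some c => String.ofList [c]
    | none => ""        -- unreachable inside Pre_ (IndexError in Python)
  else
    let j := az - 26
    let first := PySem.Int.floordiv j 25
    let rem := PySem.Int.mod j 25
    let rest := PySem.List.slice alphabet none (some first) ++
                PySem.List.slice alphabet (some (first + 1)) none
    match PySem.List.pyGet? alphabet first, PySem.List.pyGet? rest rem with
    | some c, some d => String.ofList [c, d]
    | _, _ => ""        -- unreachable inside Pre_ (IndexError in Python)

-- ===== PRECONDITION & SPEC =====
-- Pre_ is exactly where Python A returns: az in [-26, 675] (negative indices wrap on the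
-- 26-letter alphabet; 26..675 index the 650 two-letter permutations; outside, A raises IndexError).
def Pre_my_alphabet (az : Int) : Prop := -26 ≤ az ∧ az ≤ 675
instance (az : Int) : Decidable (Pre_my_alphabet az) := by unfold Pre_my_alphabet; infer_instance
def pvWitness_my_alphabet : Int := (30)
def Spec_my_alphabet (az : Int) (out : String) : Prop := out = my_alphabet_alt az
instance (az : Int) (out : String) : Decidable (Spec_my_alphabet az out) := by unfold Spec_my_alphabet; infer_instance

-- ===== CLAIM (what is proved, stated in full; the proofs are below) =====
def Claim_equal_my_alphabet : Prop := ∀ (az : Int), Dom_my_alphabet az → Pre_my_alphabet az → Spec_my_alphabet az (my_alphabet az)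

-- ===== LEMMAS AND PROOFS =====
set_option maxHeartbeats 4000000 in
set_option maxRecDepth 100000 in
theorem my_alphabet_key : (List.range 702).all
    (fun n => my_alphabet ((n : Int) - 26) == my_alphabet_alt ((n : Int) - 26)) = true := by
  decide

-- ===== VERDICT (by name: the statement is the Claim_ definition above) =====
theorem my_alphabet_spec : Claim_equal_my_alphabet := by
  intro az _ hpre
  obtain ⟨h1, h2⟩ := hpre
  unfold Spec_my_alphabet
  have hlt : (az + 26).toNat < 702 := by omega
  have hz : ((az + 26).toNat : Int) - 26 = az := by omega
  have h := List.all_eq_true.mp my_alphabet_key _ (List.mem_range.mpr hlt)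
  simp only [hz] at h
  exact eq_of_beq h
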